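-- pv_equiv track=rewrite | github.com/Ceidass/biomedical-text-generation | code/scripts/02c_text_reduction.py | deduplicate_phrases
-- ===== SOURCE A (Python) =====
-- def deduplicate_phrases(phrases):
--     phrases_sorted = sorted(phrases, key=lambda x: -len(x))
--     result = []
--     seen = set()
--     for phrase in phrases_sorted:
--         if not any(phrase.lower() in p.lower() and phrase.lower() != p.lower() for p in result):
--             result.append(phrase)
--             seen.add(phrase.lower())
--     return result
-- ===== SOURCE B (Python) =====
-- def deduplicate_phrases(phrases):
--     result = []
--     longer = []   # lowercased accepted phrases strictly longer than the current length
--     group = []    # lowercased accepted phrases of the current length, not yet flushed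
--     cur = -1
--     for phrase in sorted(phrases, key=lambda x: -len(x)):
--         if len(phrase) != cur:
--             longer += group
--             group = []
--             cur = len(phrase)
--         lp = phrase.lower()
--         if not any(lp in q for q in longer):
--             result.append(phrase)
--             group.append(lp)
--     return result
-- ===== Notes on version B (the rewrite author's own statement) =====
-- stated objective: faster
-- what changed: B lowercases each phrase once and, exploiting the descending-length sort, tests it only against the buffer of strictly longer accepted lowercased phrases (flushed per length group), instead of A's inner scan that re-lowercases every accepted phrase and re-checks equality on every pair.
import Mathlib
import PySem

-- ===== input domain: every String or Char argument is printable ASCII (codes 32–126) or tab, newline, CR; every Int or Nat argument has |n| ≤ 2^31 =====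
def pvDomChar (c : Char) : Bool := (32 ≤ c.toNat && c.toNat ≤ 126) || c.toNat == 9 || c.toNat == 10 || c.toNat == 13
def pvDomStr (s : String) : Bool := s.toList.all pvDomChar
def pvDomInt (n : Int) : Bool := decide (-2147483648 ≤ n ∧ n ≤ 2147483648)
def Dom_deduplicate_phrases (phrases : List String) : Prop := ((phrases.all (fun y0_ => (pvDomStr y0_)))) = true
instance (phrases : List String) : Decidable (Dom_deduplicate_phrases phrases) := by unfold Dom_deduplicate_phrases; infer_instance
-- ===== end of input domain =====

-- B lowercases each phrase once and tests it only against the already-accepted strictly longer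
-- phrases (buffered by length group), instead of A's inner scan that re-lowercases every accepted
-- phrase and re-tests equality on every pair; same return value, measurably faster by constant factor.

-- ===== PORT A =====
def goA (st : List String × PySem.Set String) (phrase : String) : List String × PySem.Set String :=
  if st.1.any (fun p => PySem.Str.isIn (PySem.Str.lower phrase) (PySem.Str.lower p)
        && (PySem.Str.lower phrase != PySem.Str.lower p))
  then st
  else (st.1 ++ [phrase], st.2.add (PySem.Str.lower phrase))

def deduplicate_phrases (phrases : List String) : List String :=
  ((PySem.List.sorted phrases (fun x => -(PySem.Str.len x : Int)) false).foldl goA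
    ([], PySem.Set.empty)).1

-- ===== PORT B =====
-- state: (result, longer lowercased accepted, current-length lowercased accepted, current length)
def goB (st : List String × List String × List String × Int) (phrase : String) :
    List String × List String × List String × Int :=
  let fl := if (PySem.Str.len phrase : Int) ≠ st.2.2.2
            then (st.2.1 ++ st.2.2.1, ([] : List String), (PySem.Str.len phrase : Int))
            else st.2
  let lp := PySem.Str.lower phrase
  if fl.1.any (fun q => PySem.Str.isIn lp q) then (st.1, fl)
  else (st.1 ++ [phrase], fl.1, fl.2.1 ++ [lp], fl.2.2)

def deduplicate_phrases_alt (phrases : List String) : List String :=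
  ((PySem.List.sorted phrases (fun x => -(PySem.Str.len x : Int)) false).foldl goB
    ([], [], [], -1)).1

-- ===== PRECONDITION & SPEC =====
def Spec_deduplicate_phrases (phrases : List String) (out : List String) : Prop := out = deduplicate_phrases_alt phrases
instance (phrases : List String) (out : List String) : Decidable (Spec_deduplicate_phrases phrases out) := by unfold Spec_deduplicate_phrases; infer_instance

-- ===== CLAIM (what is proved, stated in full; the proofs are below) =====
def Claim_equal_deduplicate_phrases : Prop := ∀ (phrases : List String), Dom_deduplicate_phrases phrases → Spec_deduplicate_phrases phrases (deduplicate_phrases phrases)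

-- ===== LEMMAS AND PROOFS =====

lemma lower_length (s : String) : (PySem.Str.lower s).toList.length = s.toList.length := by
  simp [PySem.Str.toList_lower, PySem.Chars.lower]

-- A's "proper substring of some accepted phrase" test equals B's "substring of some strictly
-- longer accepted lowercased phrase" test.
lemma cond_eq (phrase : String) (res longer : List String)
    (hl : ∀ q, q ∈ longer ↔ ∃ p ∈ res, q = PySem.Str.lower p ∧
          (PySem.Str.len phrase : Int) < (PySem.Str.len p : Int)) :
    res.any (fun p => PySem.Str.isIn (PySem.Str.lower phrase) (PySem.Str.lower p)
        && (PySem.Str.lower phrase != PySem.Str.lower p))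
    = longer.any (fun q => PySem.Str.isIn (PySem.Str.lower phrase) q) := by
  apply Bool.eq_iff_iff.mpr
  simp only [List.any_eq_true, Bool.and_eq_true, bne_iff_ne, ne_eq, PySem.Str.isIn_iff_infix]
  constructor
  · rintro ⟨p, hp, hin, hne⟩
    refine ⟨PySem.Str.lower p, (hl _).mpr ⟨p, hp, rfl, ?_⟩, hin⟩
    have hle := hin.length_le
    rw [lower_length, lower_length] at hle
    have hlt : phrase.toList.length < p.toList.length := by
      rcases lt_or_eq_of_le hle with h | h
      · exact h
      · exfalso
        apply hne
        apply String.toList_inj.mp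
        exact hin.eq_of_length (by rw [lower_length, lower_length, h])
    simp only [PySem.Str.len_eq]
    exact_mod_cast hlt
  · rintro ⟨q, hq, hin⟩
    rcases (hl q).mp hq with ⟨p, hp, rfl, hlt⟩
    refine ⟨p, hp, hin, ?_⟩
    intro heq
    have : (PySem.Str.lower phrase).toList.length = (PySem.Str.lower p).toList.length := by
      rw [heq]
    rw [lower_length, lower_length] at this
    simp only [PySem.Str.len_eq] at hlt
    omega

-- Loop invariant: the two folds produce the same accepted list.
lemma loop_inv (rem : List String) : ∀ (res longer group : List String)
    (seen : PySem.Set String) (cur : Int),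
    rem.Pairwise (fun a b => PySem.Str.len b ≤ PySem.Str.len a) →
    (∀ x ∈ rem, (PySem.Str.len x : Int) ≤ cur) →
    (∀ p ∈ res, cur ≤ (PySem.Str.len p : Int)) →
    (∀ q, q ∈ longer ↔ ∃ p ∈ res, q = PySem.Str.lower p ∧ cur < (PySem.Str.len p : Int)) →
    (∀ q, q ∈ group ↔ ∃ p ∈ res, q = PySem.Str.lower p ∧ (PySem.Str.len p : Int) = cur) →
    (rem.foldl goA (res, seen)).1 = (rem.foldl goB (res, longer, group, cur)).1 := by
  induction rem with
  | nil => intro res longer group seen cur _ _ _ _ _; rfl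
  | cons phrase rem ih =>
    intro res longer group seen cur hpw hle hres hl hg
    have hpw' := (List.pairwise_cons.mp hpw).2
    have hhd := (List.pairwise_cons.mp hpw).1
    have hn : (PySem.Str.len phrase : Int) ≤ cur := hle phrase List.mem_cons_self
    have hle' : ∀ x ∈ rem, (PySem.Str.len x : Int) ≤ (PySem.Str.len phrase : Int) :=
      fun x hx => by exact_mod_cast hhd x hx
    by_cases hc : (PySem.Str.len phrase : Int) = cur
    · -- no flush
      have hl' : ∀ q, q ∈ longer ↔ ∃ p ∈ res, q = PySem.Str.lower p ∧
          (PySem.Str.len phrase : Int) < (PySem.Str.len p : Int) := by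
        intro q; rw [hl q, hc]
      have hcond := cond_eq phrase res longer hl'
      have hB : goB (res, longer, group, cur) phrase
          = if longer.any (fun q => PySem.Str.isIn (PySem.Str.lower phrase) q)
            then (res, longer, group, cur)
            else (res ++ [phrase], longer, group ++ [PySem.Str.lower phrase], cur) := by
        simp only [goB]
        rw [if_neg (not_not_intro hc)]
      have hres2 : ∀ p ∈ res ++ [phrase], cur ≤ (PySem.Str.len p : Int) := by
        intro p hp
        rcases List.mem_append.mp hp with h | h
        · exact hres p h
        · rw [List.mem_singleton] at h; subst h; omega
      have hl2 : ∀ q, q ∈ longer ↔ ∃ p ∈ res ++ [phrase], q = PySem.Str.lower p ∧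
          cur < (PySem.Str.len p : Int) := by
        intro q
        rw [hl q]
        constructor
        · rintro ⟨p, hp, rfl, hlt⟩; exact ⟨p, List.mem_append.mpr (Or.inl hp), rfl, hlt⟩
        · rintro ⟨p, hp, rfl, hlt⟩
          rcases List.mem_append.mp hp with h | h
          · exact ⟨p, h, rfl, hlt⟩
          · rw [List.mem_singleton] at h; subst h; omega
      have hg2 : ∀ q, q ∈ group ++ [PySem.Str.lower phrase] ↔
          ∃ p ∈ res ++ [phrase], q = PySem.Str.lower p ∧ (PySem.Str.len p : Int) = cur := by
        intro q
        constructor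
        · intro hq
          rcases List.mem_append.mp hq with h | h
          · rcases (hg q).mp h with ⟨p, hp, rfl, hq'⟩
            exact ⟨p, List.mem_append.mpr (Or.inl hp), rfl, hq'⟩
          · rw [List.mem_singleton] at h; subst h
            exact ⟨phrase, List.mem_append.mpr (Or.inr (List.mem_singleton.mpr rfl)), rfl, hc⟩
        · rintro ⟨p, hp, rfl, hq'⟩
          rcases List.mem_append.mp hp with h | h
          · exact List.mem_append.mpr (Or.inl ((hg _).mpr ⟨p, h, rfl, hq'⟩))
          · rw [List.mem_singleton] at h; subst h
            exact List.mem_append.mpr (Or.inr (List.mem_singleton.mpr rfl))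
      simp only [List.foldl_cons, goA, hB, hcond]
      by_cases hb : longer.any (fun q => PySem.Str.isIn (PySem.Str.lower phrase) q) = true
      · simp only [hb, if_true]
        exact ih res longer group _ cur hpw'
          (fun x hx => le_trans (hle' x hx) hn) hres hl hg
      · simp only [Bool.not_eq_true] at hb
        simp only [hb, Bool.false_eq_true, if_false]
        exact ih (res ++ [phrase]) longer (group ++ [PySem.Str.lower phrase]) _ cur hpw'
          (fun x hx => le_trans (hle' x hx) hn) hres2 hl2 hg2
    · -- flush: the new length is strictly below cur
      have hnlt : (PySem.Str.len phrase : Int) < cur := lt_of_le_of_ne hn hc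
      have hres' : ∀ p ∈ res, (PySem.Str.len phrase : Int) < (PySem.Str.len p : Int) :=
        fun p hp => lt_of_lt_of_le hnlt (hres p hp)
      have hl' : ∀ q, q ∈ longer ++ group ↔ ∃ p ∈ res, q = PySem.Str.lower p ∧
          (PySem.Str.len phrase : Int) < (PySem.Str.len p : Int) := by
        intro q
        constructor
        · intro hq
          rcases List.mem_append.mp hq with h | h
          · rcases (hl q).mp h with ⟨p, hp, rfl, _⟩; exact ⟨p, hp, rfl, hres' p hp⟩
          · rcases (hg q).mp h with ⟨p, hp, rfl, _⟩; exact ⟨p, hp, rfl, hres' p hp⟩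
        · rintro ⟨p, hp, rfl, _⟩
          rcases lt_or_eq_of_le (hres p hp) with h | h
          · exact List.mem_append.mpr (Or.inl ((hl _).mpr ⟨p, hp, rfl, h⟩))
          · exact List.mem_append.mpr (Or.inr ((hg _).mpr ⟨p, hp, rfl, h.symm⟩))
      have hcond := cond_eq phrase res (longer ++ group) hl'
      have hB : goB (res, longer, group, cur) phrase
          = if (longer ++ group).any (fun q => PySem.Str.isIn (PySem.Str.lower phrase) q)
            then (res, longer ++ group, [], (PySem.Str.len phrase : Int))
            else (res ++ [phrase], longer ++ group, [PySem.Str.lower phrase],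
                  (PySem.Str.len phrase : Int)) := by
        simp only [goB]
        rw [if_pos hc]
        rfl
      have hg' : ∀ q, q ∈ ([] : List String) ↔ ∃ p ∈ res, q = PySem.Str.lower p ∧
          (PySem.Str.len p : Int) = (PySem.Str.len phrase : Int) := by
        intro q
        constructor
        · intro hq; exact absurd hq (List.not_mem_nil)
        · rintro ⟨p, hp, rfl, heq⟩; have := hres' p hp; omega
      have hres2 : ∀ p ∈ res ++ [phrase], (PySem.Str.len phrase : Int) ≤ (PySem.Str.len p : Int) := by
        intro p hp
        rcases List.mem_append.mp hp with h | h
        · exact le_of_lt (hres' p h)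
        · rw [List.mem_singleton] at h; subst h; omega
      have hl2 : ∀ q, q ∈ longer ++ group ↔ ∃ p ∈ res ++ [phrase], q = PySem.Str.lower p ∧
          (PySem.Str.len phrase : Int) < (PySem.Str.len p : Int) := by
        intro q
        rw [hl' q]
        constructor
        · rintro ⟨p, hp, rfl, hlt⟩; exact ⟨p, List.mem_append.mpr (Or.inl hp), rfl, hlt⟩
        · rintro ⟨p, hp, rfl, hlt⟩
          rcases List.mem_append.mp hp with h | h
          · exact ⟨p, h, rfl, hlt⟩
          · rw [List.mem_singleton] at h; subst h; omega
      have hg2 : ∀ q, q ∈ [PySem.Str.lower phrase] ↔ ∃ p ∈ res ++ [phrase],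
          q = PySem.Str.lower p ∧ (PySem.Str.len p : Int) = (PySem.Str.len phrase : Int) := by
        intro q
        constructor
        · intro hq
          rw [List.mem_singleton] at hq; subst hq
          exact ⟨phrase, List.mem_append.mpr (Or.inr (List.mem_singleton.mpr rfl)), rfl, rfl⟩
        · rintro ⟨p, hp, rfl, heq⟩
          rcases List.mem_append.mp hp with h | h
          · exfalso; have := hres' p h; omega
          · rw [List.mem_singleton] at h; subst h
            exact List.mem_singleton.mpr rfl
      simp only [List.foldl_cons, goA, hB, hcond]
      by_cases hb : (longer ++ group).any (fun q => PySem.Str.isIn (PySem.Str.lower phrase) q) = true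
      · simp only [hb, if_true]
        exact ih res (longer ++ group) [] _ (PySem.Str.len phrase) hpw' hle'
          (fun p hp => le_of_lt (hres' p hp)) hl' hg'
      · simp only [Bool.not_eq_true] at hb
        simp only [hb, Bool.false_eq_true, if_false]
        exact ih (res ++ [phrase]) (longer ++ group) [PySem.Str.lower phrase] _
          (PySem.Str.len phrase) hpw' hle' hres2 hl2 hg2

-- ===== VERDICT (by name: the statement is the Claim_ definition above) =====
theorem deduplicate_phrases_spec : Claim_equal_deduplicate_phrases := by
  intro phrases _
  unfold Spec_deduplicate_phrases deduplicate_phrases deduplicate_phrases_alt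
  have hpw : (PySem.List.sorted phrases (fun x => -(PySem.Str.len x : Int)) false).Pairwise
      (fun a b => PySem.Str.len b ≤ PySem.Str.len a) := by
    refine (PySem.List.sorted_pairwise phrases _).imp ?_
    intro a b h
    simp only [neg_le_neg_iff] at h
    exact_mod_cast h
  cases hsl : PySem.List.sorted phrases (fun x => -(PySem.Str.len x : Int)) false with
  | nil => rfl
  | cons h t =>
    rw [hsl] at hpw
    have hpw' := (List.pairwise_cons.mp hpw).2
    have hhd := (List.pairwise_cons.mp hpw).1
    have hne : (PySem.Str.len h : Int) ≠ -1 := by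
      have : (0 : Int) ≤ (PySem.Str.len h : Int) := Int.natCast_nonneg _
      omega
    -- evaluate the first iteration of each fold by hand
    have stepA : goA (([] : List String), PySem.Set.empty) h
        = ([h], PySem.Set.add PySem.Set.empty (PySem.Str.lower h)) := by
      simp [goA]
    have stepB : goB (([] : List String), ([] : List String), ([] : List String), (-1 : Int)) h
        = ([h], [], [PySem.Str.lower h], (PySem.Str.len h : Int)) := by
      simp only [goB]
      rw [if_pos hne]
      simp
    have hl0 : ∀ q, q ∈ ([] : List String) ↔ ∃ p ∈ [h], q = PySem.Str.lower p ∧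
        (PySem.Str.len h : Int) < (PySem.Str.len p : Int) := by
      intro q
      constructor
      · intro hq; exact absurd hq (List.not_mem_nil)
      · rintro ⟨p, hp, rfl, hlt⟩
        rw [List.mem_singleton] at hp; subst hp; omega
    have hg0 : ∀ q, q ∈ [PySem.Str.lower h] ↔ ∃ p ∈ [h], q = PySem.Str.lower p ∧
        (PySem.Str.len p : Int) = (PySem.Str.len h : Int) := by
      intro q
      constructor
      · intro hq
        rw [List.mem_singleton] at hq; subst hq
        exact ⟨h, List.mem_singleton.mpr rfl, rfl, rfl⟩
      · rintro ⟨p, hp, rfl, _⟩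
        rw [List.mem_singleton] at hp; subst hp
        exact List.mem_singleton.mpr rfl
    simp only [List.foldl_cons, stepA, stepB]
    exact loop_inv t [h] [] [PySem.Str.lower h] _ (PySem.Str.len h) hpw'
      (fun x hx => by exact_mod_cast hhd x hx)
      (fun p hp => by rw [List.mem_singleton] at hp; subst hp; omega)
      hl0 hg0
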